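-- pv_equiv track=rewrite | github.com/caprolt/LaudatorAI | backend/app/services/resume_processing.py | _tailor_skills
-- ===== SOURCE A (Python) =====
-- from typing import Dict, Any, List, Optional
--
-- def _tailor_skills(resume_skills: List[str], job_skills: List[str]) -> List[str]:
--     """Tailor skills to match job requirements."""
--     if not job_skills:
--         return resume_skills
--
--     # Prioritize skills that match job requirements
--     matched_skills = []
--     other_skills = []
--
--     for skill in resume_skills:
--         skill_lower = skill.lower()
--         if any(job_skill.lower() in skill_lower or skill_lower in job_skill.lower()
--                for job_skill in job_skills):
--             matched_skills.append(skill)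
--         else:
--             other_skills.append(skill)
--
--     # Return matched skills first, then others
--     return matched_skills + other_skills
-- ===== SOURCE B (Python) =====
-- from typing import List
--
-- def _no_match(job_lowers, skill):
--     sl = skill.lower()
--     return not any(jl in sl or sl in jl for jl in job_lowers)
--
-- def _tailor_skills(resume_skills: List[str], job_skills: List[str]) -> List[str]:
--     """Tailor skills to match job requirements."""
--     if not job_skills:
--         return resume_skills
--     job_lowers = [j.lower() for j in job_skills]
--     # stable sort on a boolean key: matching skills (key False) come first,
--     # original relative order preserved within each group
--     return sorted(resume_skills, key=lambda s: _no_match(job_lowers, s))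
-- ===== Notes on version B (the rewrite author's own statement) =====
-- stated objective: alternative
-- what changed: Replaces A's explicit two-bucket partition loop with a single stable sort keyed on a boolean no-match predicate over precomputed lowercased job skills; stability makes the sorted order coincide with matched-then-others.
import Mathlib
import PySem

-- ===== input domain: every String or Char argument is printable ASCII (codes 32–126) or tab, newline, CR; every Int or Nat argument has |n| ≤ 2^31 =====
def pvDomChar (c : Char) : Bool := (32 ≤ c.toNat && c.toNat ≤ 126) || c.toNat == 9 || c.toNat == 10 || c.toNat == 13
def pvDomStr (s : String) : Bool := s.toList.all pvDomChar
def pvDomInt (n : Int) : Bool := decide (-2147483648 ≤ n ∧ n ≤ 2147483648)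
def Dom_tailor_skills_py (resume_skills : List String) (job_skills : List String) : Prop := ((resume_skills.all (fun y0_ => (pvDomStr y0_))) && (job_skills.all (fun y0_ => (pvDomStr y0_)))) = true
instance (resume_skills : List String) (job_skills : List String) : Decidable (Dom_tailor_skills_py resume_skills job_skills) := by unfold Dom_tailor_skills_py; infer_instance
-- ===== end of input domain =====

-- B replaces A's explicit two-bucket partition loop by ONE stable sort on a boolean
-- no-match key (matching skills sort first; stability keeps the relative order) — objective: alternative.

-- ===== PORT A =====
-- step of A's for-loop: append skill to matched_skills or other_skills
def pvAStep (job_skills : List String) (acc : List String × List String) (skill : String) : List String × List String :=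
  let skill_lower := PySem.Str.lower skill
  if job_skills.any (fun job_skill =>
       PySem.Str.isIn (PySem.Str.lower job_skill) skill_lower ||
       PySem.Str.isIn skill_lower (PySem.Str.lower job_skill))
  then (acc.1 ++ [skill], acc.2)
  else (acc.1, acc.2 ++ [skill])

def tailor_skills_py (resume_skills : List String) (job_skills : List String) : List String :=
  if job_skills = [] then resume_skills
  else
    let p := resume_skills.foldl (pvAStep job_skills) ([], [])
    p.1 ++ p.2

-- ===== PORT B =====
-- B's helper _no_match: True iff the skill matches no job skill
def pvBNoMatch (job_lowers : List String) (skill : String) : Bool :=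
  let sl := PySem.Str.lower skill
  !(job_lowers.any (fun jl => PySem.Str.isIn jl sl || PySem.Str.isIn sl jl))

def tailor_skills_py_alt (resume_skills : List String) (job_skills : List String) : List String :=
  if job_skills = [] then resume_skills
  else
    let job_lowers := job_skills.map PySem.Str.lower
    PySem.List.sorted resume_skills (fun s => pvBNoMatch job_lowers s) false

-- ===== PRECONDITION & SPEC =====
def Spec_tailor_skills_py (resume_skills : List String) (job_skills : List String) (out : List String) : Prop := out = tailor_skills_py_alt resume_skills job_skills
instance (resume_skills : List String) (job_skills : List String) (out : List String) : Decidable (Spec_tailor_skills_py resume_skills job_skills out) := by unfold Spec_tailor_skills_py; infer_instance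

-- ===== CLAIM (what is proved, stated in full; the proofs are below) =====
def Claim_equal_tailor_skills_py : Prop := ∀ (resume_skills : List String) (job_skills : List String), Dom_tailor_skills_py resume_skills job_skills → Spec_tailor_skills_py resume_skills job_skills (tailor_skills_py resume_skills job_skills)

-- ===== LEMMAS AND PROOFS =====

-- insertBy with a boolean key into a false-block ++ true-block keeps the blocks
theorem pvInsertBy_bool {α : Type} (key : α → Bool) (x : α) (F T : List α)
    (hF : ∀ y ∈ F, key y = false) (hT : ∀ y ∈ T, key y = true) :
    PySem.List.insertBy (fun a b => decide (key a < key b)) x (F ++ T)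
      = if key x then F ++ T ++ [x] else F ++ x :: T := by
  induction F with
  | nil =>
      simp only [List.nil_append]
      cases T with
      | nil => cases key x <;> simp [PySem.List.insertBy]
      | cons t ts =>
          have ht : key t = true := hT t (by simp)
          cases hx : key x with
          | false =>
              simp [PySem.List.insertBy, ht, hx]
          | true =>
              have : ∀ (T : List α), (∀ y ∈ T, key y = true) →
                  PySem.List.insertBy (fun a b => decide (key a < key b)) x T = T ++ [x] := by
                intro T
                induction T with
                | nil => intro _; simp [PySem.List.insertBy]
                | cons u us ihu =>
                    intro h
                    have hu := h u (by simp)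
                    simp [PySem.List.insertBy, hu, hx, ihu (fun y hy => h y (by simp [hy]))]
              simp [this (t :: ts) hT]
  | cons f fs ih =>
      have hf : key f = false := hF f (by simp)
      have ih' := ih (fun y hy => hF y (by simp [hy]))
      cases hx : key x with
      | false => simp [PySem.List.insertBy, hf, hx] at ih' ⊢; simp [ih']
      | true => simp [PySem.List.insertBy, hf, hx] at ih' ⊢; simp [ih']

-- folding insertBy over xs from a partitioned accumulator appends the two filters
theorem pvFoldInsert_partition {α : Type} (key : α → Bool) (xs : List α) (F T : List α)
    (hF : ∀ y ∈ F, key y = false) (hT : ∀ y ∈ T, key y = true) :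
    xs.foldl (fun acc x => PySem.List.insertBy (fun a b => decide (key a < key b)) x acc) (F ++ T)
      = (F ++ xs.filter (fun x => !key x)) ++ (T ++ xs.filter (fun x => key x)) := by
  induction xs generalizing F T with
  | nil => simp
  | cons x xs ih =>
      simp only [List.foldl_cons, List.filter_cons]
      rw [pvInsertBy_bool key x F T hF hT]
      cases hx : key x with
      | false =>
          have := ih (F ++ [x]) T
            (by intro y hy; rcases List.mem_append.1 hy with h | h
                · exact hF y h
                · simp at h; simpa [h] using hx) hT
          simp only [List.append_assoc] at this ⊢
          simpa [hx] using this
      | true =>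
          have := ih F (T ++ [x]) hF
            (by intro y hy; rcases List.mem_append.1 hy with h | h
                · exact hT y h
                · simp at h; simpa [h] using hx)
          simp only [List.append_assoc] at this ⊢
          simpa [hx] using this

-- a stable sort on a boolean key IS the stable partition
theorem pvSorted_bool {α : Type} (key : α → Bool) (xs : List α) :
    PySem.List.sorted xs key false
      = xs.filter (fun x => !key x) ++ xs.filter (fun x => key x) := by
  rw [PySem.List.sorted_eq_foldl_insertBy]
  simpa using pvFoldInsert_partition key xs [] [] (by simp) (by simp)

-- A's branch test equals the negation of B's no-match key
theorem pvStep_test_eq (job_skills : List String) (skill : String) :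
    (job_skills.any (fun job_skill =>
       PySem.Str.isIn (PySem.Str.lower job_skill) (PySem.Str.lower skill) ||
       PySem.Str.isIn (PySem.Str.lower skill) (PySem.Str.lower job_skill)))
    = !pvBNoMatch (job_skills.map PySem.Str.lower) skill := by
  simp [pvBNoMatch, List.any_map, Function.comp_def]

-- A's fold partitions: the buckets are the two filters
theorem pvFold_partition (job_skills : List String) (xs : List String) (m o : List String) :
    xs.foldl (pvAStep job_skills) (m, o)
      = (m ++ xs.filter (fun s => !pvBNoMatch (job_skills.map PySem.Str.lower) s),
         o ++ xs.filter (fun s => pvBNoMatch (job_skills.map PySem.Str.lower) s)) := by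
  induction xs generalizing m o with
  | nil => simp
  | cons x xs ih =>
      simp only [List.foldl_cons, List.filter_cons]
      rw [pvAStep, pvStep_test_eq]
      by_cases h : pvBNoMatch (job_skills.map PySem.Str.lower) x
      · simp [h, ih]
      · simp at h; simp [h, ih]

-- ===== VERDICT (by name: the statement is the Claim_ definition above) =====
theorem tailor_skills_py_spec : Claim_equal_tailor_skills_py := by
  intro resume_skills job_skills _
  unfold Spec_tailor_skills_py tailor_skills_py tailor_skills_py_alt
  by_cases h : job_skills = []
  · simp [h]
  · simp only [h, reduceIte]
    rw [pvFold_partition, pvSorted_bool]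
    simp
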